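-- pv_equiv track=rewrite | github.com/onixuniverse/university_tasks | 3.67.py | find_multiply
-- ===== SOURCE A (Python) =====
-- def find_multiply(arr: list):
--     result = 1
--     i = 0
--
--     for num in arr:
--         if num > 0:
--             i += 1
--
--             if i in (1, 3, 6):
--                 result *= num
--
--     return result
-- ===== SOURCE B (Python) =====
-- def find_multiply(arr: list):
--     positives = [x for x in arr if x > 0]
--     result = 1
--     for i in (0, 2, 5):
--         if i < len(positives):
--             result *= positives[i]
--     return result
-- ===== Notes on version B (the rewrite author's own statement) =====
-- stated objective: simpler
-- what changed: B first collects the positive numbers into a list in one pass, then multiplies the entries at the fixed target indices 0, 2, 5 (guarded by length), instead of A's single pass that interleaves a running positive-counter with membership tests.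
import Mathlib
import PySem

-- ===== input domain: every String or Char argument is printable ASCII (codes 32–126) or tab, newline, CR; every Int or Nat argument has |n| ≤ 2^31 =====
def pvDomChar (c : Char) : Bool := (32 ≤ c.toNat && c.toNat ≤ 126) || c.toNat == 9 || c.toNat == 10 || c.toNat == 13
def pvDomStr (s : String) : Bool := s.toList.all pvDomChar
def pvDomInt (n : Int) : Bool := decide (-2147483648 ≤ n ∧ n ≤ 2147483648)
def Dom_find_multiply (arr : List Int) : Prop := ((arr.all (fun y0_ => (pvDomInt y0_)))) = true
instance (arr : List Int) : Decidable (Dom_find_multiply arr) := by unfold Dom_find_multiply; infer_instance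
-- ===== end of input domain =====

-- B collects the positives first, then multiplies the entries at fixed indices 0, 2, 5;
-- A interleaves a running positive-counter in one pass. Objective: simpler decomposition.

-- ===== PORT A =====
-- one loop over arr carrying (result, i); i counts positives, multiply when i ∈ {1,3,6}
def findMultiplyLoopA : List Int → Int → Int → Int
  | [], result, _ => result
  | num :: rest, result, i =>
    if num > 0 then
      if i + 1 = 1 ∨ i + 1 = 3 ∨ i + 1 = 6 then
        findMultiplyLoopA rest (result * num) (i + 1)
      else
        findMultiplyLoopA rest result (i + 1)
    else
      findMultiplyLoopA rest result i

def find_multiply (arr : List Int) : Int := findMultiplyLoopA arr 1 0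

-- ===== PORT B =====
def find_multiply_alt (arr : List Int) : Int :=
  let positives := arr.filter (fun x => decide (x > 0))
  ([0, 2, 5] : List Nat).foldl
    (fun result i => if h : i < positives.length then result * positives[i] else result) 1

-- ===== PRECONDITION & SPEC =====
def Spec_find_multiply (arr : List Int) (out : Int) : Prop := out = find_multiply_alt arr
instance (arr : List Int) (out : Int) : Decidable (Spec_find_multiply arr out) := by unfold Spec_find_multiply; infer_instance

-- ===== CLAIM (what is proved, stated in full; the proofs are below) =====
def Claim_equal_find_multiply : Prop := ∀ (arr : List Int), Dom_find_multiply arr → Spec_find_multiply arr (find_multiply arr)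

-- ===== LEMMAS AND PROOFS =====

-- picks from a positives list, indexed globally starting at i (matching A's counter)
def gpick : Int → List Int → Int
  | _, [] => 1
  | i, p :: rest => (if i + 1 = 1 ∨ i + 1 = 3 ∨ i + 1 = 6 then p else 1) * gpick (i + 1) rest

theorem gpick_ge (ps : List Int) : ∀ i : Int, 6 ≤ i → gpick i ps = 1 := by
  induction ps with
  | nil => intro i _; rfl
  | cons p rest ih =>
    intro i hi
    unfold gpick
    rw [if_neg (by omega), ih (i + 1) (by omega)]
    ring

theorem loopA_eq (l : List Int) : ∀ r i : Int,
    findMultiplyLoopA l r i = r * gpick i (l.filter (fun x => decide (x > 0))) := by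
  induction l with
  | nil => intro r i; simp [findMultiplyLoopA, gpick]
  | cons num rest ih =>
    intro r i
    by_cases hp : num > 0
    · simp [findMultiplyLoopA, hp, List.filter, gpick, ih]
      split_ifs <;> ring
    · simp [findMultiplyLoopA, hp, List.filter, ih]

theorem gpick_zero (ps : List Int) :
    gpick 0 ps =
      ([0, 2, 5] : List Nat).foldl
        (fun result i => if h : i < ps.length then result * ps[i] else result) 1 := by
  rcases ps with _ | ⟨a, _ | ⟨b, _ | ⟨c, _ | ⟨d, _ | ⟨e, _ | ⟨f, rest⟩⟩⟩⟩⟩⟩ <;>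
    simp [gpick, List.foldl] <;> try ring
  rw [gpick_ge rest 6 (by omega)]
  ring

-- ===== VERDICT (by name: the statement is the Claim_ definition above) =====
theorem find_multiply_spec : Claim_equal_find_multiply := by
  intro arr _
  unfold Spec_find_multiply find_multiply find_multiply_alt
  rw [loopA_eq, one_mul, gpick_zero]
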